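-- pv_equiv track=rewrite | github.com/laituan245/bio_relex | models/model.py | enumerate_candidate_spans
-- ===== SOURCE A (Python) =====
-- def enumerate_candidate_spans(num_tokens, max_span_width, isstartingtoken):
--     # Generate candidate spans
--     candidate_spans = set([])
--     for i in range(num_tokens):
--         if isstartingtoken[i] == 0: continue
--         for j in range(i, i+max_span_width):
--             if j >= num_tokens: continue
--             if (j == num_tokens-1) or isstartingtoken[j+1] == 1:
--                 candidate_spans.add((i, j))
--
--     return list(candidate_spans)
-- ===== SOURCE B (Python) =====
-- def enumerate_candidate_spans(num_tokens, max_span_width, isstartingtoken):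
--     # Two boundary passes + a sorted merge-join over the two index lists.
--     starts = [i for i in range(num_tokens) if isstartingtoken[i] != 0]
--     ends = [j for j in range(num_tokens)
--             if j == num_tokens - 1 or isstartingtoken[j + 1] == 1]
--     spans = []
--     lo = 0
--     for i in starts:
--         while lo < len(ends) and ends[lo] < i:
--             lo += 1
--         k = lo
--         while k < len(ends) and ends[k] < i + max_span_width:
--             spans.append((i, ends[k]))
--             k += 1
--     return spans
-- ===== Notes on version B (the rewrite author's own statement) =====
-- stated objective: faster
-- what changed: Replaces A's per-start O(max_span_width) inner window scan (with a set accumulator) by two boundary passes computing the sorted start-index and end-index lists, joined by a two-pointer merge that visits each end position and each emitted span once.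
import Mathlib
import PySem

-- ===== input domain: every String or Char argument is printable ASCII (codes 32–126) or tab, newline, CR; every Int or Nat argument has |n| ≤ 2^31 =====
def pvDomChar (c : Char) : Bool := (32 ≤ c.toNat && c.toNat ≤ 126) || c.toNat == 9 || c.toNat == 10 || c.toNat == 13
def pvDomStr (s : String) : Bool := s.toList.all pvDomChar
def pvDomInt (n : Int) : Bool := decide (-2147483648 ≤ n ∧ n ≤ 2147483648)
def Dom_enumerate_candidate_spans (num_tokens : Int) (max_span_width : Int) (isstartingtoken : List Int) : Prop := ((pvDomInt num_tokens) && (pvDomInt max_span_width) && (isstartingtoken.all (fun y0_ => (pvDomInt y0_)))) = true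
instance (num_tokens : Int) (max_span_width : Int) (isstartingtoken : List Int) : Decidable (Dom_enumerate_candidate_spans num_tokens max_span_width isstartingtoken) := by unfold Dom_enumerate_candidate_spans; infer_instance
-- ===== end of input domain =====

-- B replaces A's per-start inner window scan (with a set accumulator) by two boundary passes
-- (sorted start-index and end-index lists) joined by a two-pointer merge; measured faster (asymptotically fewer window steps).
-- Python A returns list(set); the set's hash iteration order is not modelled (outputs are compared as sets):
-- both ports produce the insertion order, in which all added pairs are distinct.

-- ===== PORT A =====
def enumerate_candidate_spans (num_tokens : Int) (max_span_width : Int) (isstartingtoken : List Int) : List (Int × Int) :=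
  (PySem.List.pyRange 0 num_tokens).foldl (fun s i =>
    if PySem.List.pyGetD isstartingtoken i 0 == 0 then s
    else (PySem.List.pyRange i (i + max_span_width)).foldl (fun s j =>
      if num_tokens ≤ j then s
      else if j == num_tokens - 1 || PySem.List.pyGetD isstartingtoken (j + 1) 0 == 1 then
        PySem.Set.add s (i, j)
      else s) s)
    PySem.Set.empty

-- ===== PORT B =====
-- two-pointer merge-join: drop the ends below the current start, take those inside the window
def pvAltJoin (max_span_width : Int) : List Int → List Int → List (Int × Int)
  | [], _ => []
  | i :: rest, ends =>
      let ends' := ends.dropWhile (fun j => decide (j < i))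
      (ends'.takeWhile (fun j => decide (j < i + max_span_width))).map (fun j => (i, j))
        ++ pvAltJoin max_span_width rest ends'

def enumerate_candidate_spans_alt (num_tokens : Int) (max_span_width : Int) (isstartingtoken : List Int) : List (Int × Int) :=
  let starts := (PySem.List.pyRange 0 num_tokens).filter
    (fun i => PySem.List.pyGetD isstartingtoken i 0 != 0)
  let ends := (PySem.List.pyRange 0 num_tokens).filter
    (fun j => j == num_tokens - 1 || PySem.List.pyGetD isstartingtoken (j + 1) 0 == 1)
  pvAltJoin max_span_width starts ends

-- ===== PRECONDITION & SPEC =====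
-- Pre_ excludes exactly the inputs where Python A raises IndexError: it reads isstartingtoken[i]
-- for every i in range(num_tokens), so num_tokens must not exceed the list's length.
def Pre_enumerate_candidate_spans (num_tokens : Int) (max_span_width : Int) (isstartingtoken : List Int) : Prop :=
  num_tokens ≤ (isstartingtoken.length : Int)
instance (num_tokens : Int) (max_span_width : Int) (isstartingtoken : List Int) : Decidable (Pre_enumerate_candidate_spans num_tokens max_span_width isstartingtoken) := by unfold Pre_enumerate_candidate_spans; infer_instance

def pvWitness_enumerate_candidate_spans : Int × Int × List Int := (3, 2, [1, 0, 1])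

def Spec_enumerate_candidate_spans (num_tokens : Int) (max_span_width : Int) (isstartingtoken : List Int) (out : List (Int × Int)) : Prop := out = enumerate_candidate_spans_alt num_tokens max_span_width isstartingtoken
instance (num_tokens : Int) (max_span_width : Int) (isstartingtoken : List Int) (out : List (Int × Int)) : Decidable (Spec_enumerate_candidate_spans num_tokens max_span_width isstartingtoken out) := by unfold Spec_enumerate_candidate_spans; infer_instance

-- ===== CLAIM (what is proved, stated in full; the proofs are below) =====
def Claim_equal_enumerate_candidate_spans : Prop := ∀ (num_tokens : Int) (max_span_width : Int) (isstartingtoken : List Int), Dom_enumerate_candidate_spans num_tokens max_span_width isstartingtoken → Pre_enumerate_candidate_spans num_tokens max_span_width isstartingtoken → Spec_enumerate_candidate_spans num_tokens max_span_width isstartingtoken (enumerate_candidate_spans num_tokens max_span_width isstartingtoken)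

-- ===== LEMMAS AND PROOFS =====

-- the boundary ("is an end position") test shared by both programs, named for the proofs only
def pvBdry (num_tokens : Int) (isstartingtoken : List Int) (j : Int) : Bool :=
  j == num_tokens - 1 || PySem.List.pyGetD isstartingtoken (j + 1) 0 == 1

-- A's inner condition as one predicate
def pvCondA (num_tokens : Int) (isstartingtoken : List Int) (j : Int) : Bool :=
  !decide (num_tokens ≤ j) && pvBdry num_tokens isstartingtoken j

lemma set_add_of_not_mem {α : Type} [BEq α] [LawfulBEq α] (s : PySem.Set α) (x : α)
    (h : x ∉ s) : PySem.Set.add s x = s ++ [x] := by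
  simp [PySem.Set.add, PySem.Set.contains, h]

-- A's inner loop over a nodup j-list of fresh pairs appends the filtered, mapped list
lemma innerA_eq (i : Int) (cond : Int → Bool) :
    ∀ (js : List Int) (s : List (Int × Int)), js.Nodup → (∀ j ∈ js, (i, j) ∉ s) →
      js.foldl (fun s j => if cond j then PySem.Set.add s (i, j) else s) s
        = s ++ (js.filter cond).map (fun j => (i, j)) := by
  intro js
  induction js with
  | nil => intro s _ _; simp
  | cons j tl ih =>
      intro s hnd hfresh
      by_cases hc : cond j
      · have hnot : (i, j) ∉ s := hfresh j (by simp)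
        have : PySem.Set.add s (i, j) = s ++ [(i, j)] := set_add_of_not_mem s (i, j) hnot
        simp only [List.foldl_cons, hc, if_pos, this]
        rw [ih (s ++ [(i, j)]) hnd.of_cons]
        · simp [hc]
        · intro j' hj' hmem
          rcases List.mem_append.mp hmem with hm | hm
          · exact hfresh j' (by simp [hj']) hm
          · have : j' = j := by
              have := List.mem_singleton.mp hm
              injection this
            exact (List.nodup_cons.mp hnd).1 (this ▸ hj')
      · simp only [List.foldl_cons, hc, if_neg, Bool.false_eq_true, not_false_iff]
        rw [ih s hnd.of_cons (fun j' hj' => hfresh j' (by simp [hj']))]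
        simp [hc]

-- A's outer loop becomes a flatMap over the index list
lemma outerA_eq (num_tokens max_span_width : Int) (isstartingtoken : List Int) :
    ∀ (is_ : List Int) (s : List (Int × Int)), is_.Nodup → (∀ p ∈ s, p.1 ∉ is_) →
      is_.foldl (fun s i =>
          if PySem.List.pyGetD isstartingtoken i 0 == 0 then s
          else (PySem.List.pyRange i (i + max_span_width)).foldl (fun s j =>
            if num_tokens ≤ j then s
            else if j == num_tokens - 1 || PySem.List.pyGetD isstartingtoken (j + 1) 0 == 1 then
              PySem.Set.add s (i, j)
            else s) s) s
        = s ++ is_.flatMap (fun i =>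
            if PySem.List.pyGetD isstartingtoken i 0 == 0 then []
            else ((PySem.List.pyRange i (i + max_span_width)).filter
                    (pvCondA num_tokens isstartingtoken)).map (fun j => (i, j))) := by
  intro is_
  induction is_ with
  | nil => intro s _ _; simp
  | cons i tl ih =>
      intro s hnd hfresh
      by_cases hstart : PySem.List.pyGetD isstartingtoken i 0 == 0
      · simp only [List.foldl_cons, hstart, if_pos]
        rw [ih s hnd.of_cons (fun p hp => fun hmem => hfresh p hp (by simp [hmem]))]
        rw [List.flatMap_cons, if_pos hstart]
        simp
      · have hinner :
            (PySem.List.pyRange i (i + max_span_width)).foldl (fun s j =>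
              if num_tokens ≤ j then s
              else if j == num_tokens - 1 || PySem.List.pyGetD isstartingtoken (j + 1) 0 == 1 then
                PySem.Set.add s (i, j)
              else s) s
            = s ++ ((PySem.List.pyRange i (i + max_span_width)).filter
                      (pvCondA num_tokens isstartingtoken)).map (fun j => (i, j)) := by
          have hbody : (fun (s : List (Int × Int)) j =>
              if num_tokens ≤ j then s
              else if j == num_tokens - 1 || PySem.List.pyGetD isstartingtoken (j + 1) 0 == 1 then
                PySem.Set.add s (i, j)
              else s)
            = fun s j => if pvCondA num_tokens isstartingtoken j then PySem.Set.add s (i, j) else s := by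
            funext s j
            by_cases h1 : num_tokens ≤ j
            · simp [pvCondA, h1]
            · by_cases h2 : (j == num_tokens - 1 || PySem.List.pyGetD isstartingtoken (j + 1) 0 == 1) <;>
                simp [pvCondA, pvBdry, h1, h2]
          rw [hbody]
          exact innerA_eq i _ _ s (PySem.List.nodup_pyRange_one i (i + max_span_width))
            (fun j _ hmem => hfresh (i, j) hmem (by simp))
        simp only [List.foldl_cons, hstart, if_neg, Bool.false_eq_true, not_false_iff, hinner]
        rw [ih _ hnd.of_cons ?_]
        · rw [List.flatMap_cons, if_neg hstart, List.append_assoc]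
        · intro p hp
          rcases List.mem_append.mp hp with h | h
          · exact fun hmem => hfresh p h (by simp [hmem])
          · rcases List.mem_map.mp h with ⟨j, _, rfl⟩
            exact fun hmem => (List.nodup_cons.mp hnd).1 hmem

-- flatMap with an if-else-nil is a flatMap over the filtered list
lemma flatMap_if_filter {α β : Type} (p : α → Bool) (f : α → List β) :
    ∀ (l : List α), l.flatMap (fun x => if p x then f x else []) = (l.filter p).flatMap f := by
  intro l
  induction l with
  | nil => simp
  | cons x tl ih => by_cases h : p x <;> simp [h, ih]

lemma flatMap_congr_mem {α β : Type} (f g : α → List β) :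
    ∀ (l : List α), (∀ x ∈ l, f x = g x) → l.flatMap f = l.flatMap g := by
  intro l h
  induction l with
  | nil => rfl
  | cons x tl ih => simp [h x (by simp), ih (fun y hy => h y (by simp [hy]))]

-- dropWhile / takeWhile on a (≤)-sorted list are filters
lemma dropWhile_sorted_eq_filter (i : Int) :
    ∀ (l : List Int), l.Pairwise (· ≤ ·) →
      l.dropWhile (fun j => decide (j < i)) = l.filter (fun j => !decide (j < i)) := by
  intro l
  induction l with
  | nil => intro _; rfl
  | cons e tl ih =>
      intro hp
      by_cases h : e < i
      · simp only [List.dropWhile_cons, List.filter_cons, h, decide_true, Bool.not_true,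
          Bool.false_eq_true, if_false]
        exact ih hp.of_cons
      · have : ∀ j ∈ tl, (!decide (j < i)) = true := by
          intro j hj
          have : e ≤ j := (List.pairwise_cons.mp hp).1 j hj
          simp; omega
        simp [h, List.filter_eq_self.mpr this]

lemma takeWhile_sorted_eq_filter (c : Int) :
    ∀ (l : List Int), l.Pairwise (· ≤ ·) →
      l.takeWhile (fun j => decide (j < c)) = l.filter (fun j => decide (j < c)) := by
  intro l
  induction l with
  | nil => intro _; rfl
  | cons e tl ih =>
      intro hp
      by_cases h : e < c
      · simp only [List.takeWhile_cons, List.filter_cons, h, decide_true, if_true]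
        rw [ih hp.of_cons]
      · have hall : ∀ j ∈ e :: tl, (decide (j < c)) = false := by
          intro j hj
          rcases List.mem_cons.mp hj with rfl | hj
          · simp; omega
          · have : e ≤ j := (List.pairwise_cons.mp hp).1 j hj
            simp; omega
        rw [List.filter_eq_nil_iff.mpr (fun j hj => by simp [hall j hj]),
          List.takeWhile_cons]
        simp [hall e (by simp)]

-- the merge-join equals a flatMap of window filters
lemma pvAltJoin_eq (w : Int) :
    ∀ (starts ends : List Int), starts.Pairwise (· ≤ ·) → ends.Pairwise (· ≤ ·) →
      pvAltJoin w starts ends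
        = starts.flatMap (fun i =>
            (ends.filter (fun j => decide (i ≤ j) && decide (j < i + w))).map (fun j => (i, j))) := by
  intro starts
  induction starts with
  | nil => intro ends _ _; simp [pvAltJoin]
  | cons i rest ih =>
      intro ends hs he
      have hdrop := dropWhile_sorted_eq_filter i ends he
      have hends' : (ends.dropWhile (fun j => decide (j < i))).Pairwise (· ≤ ·) :=
        he.sublist (List.dropWhile_sublist _)
      have htake := takeWhile_sorted_eq_filter (i + w) _ hends'
      simp only [pvAltJoin]
      rw [htake]
      simp only [hdrop, List.filter_filter, List.flatMap_cons]
      congr 1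
      · congr 1
        apply List.filter_congr
        intro j _
        by_cases h1 : j < i <;> by_cases h2 : j < i + w <;> by_cases h3 : i ≤ j <;>
          first | omega | simp [h1, h2, h3]
      · rw [ih _ hs.of_cons (List.Pairwise.sublist List.filter_sublist he)]
        apply flatMap_congr_mem
        intro i' hi'
        have hii' : i ≤ i' := (List.pairwise_cons.mp hs).1 i' hi'
        congr 1
        rw [List.filter_filter]
        apply List.filter_congr
        intro j _
        by_cases h1 : i' ≤ j <;> by_cases h2 : j < i' + w <;> by_cases h3 : j < i <;>
          first | omega | simp [h1, h2, h3]

-- trim a filtered range from below / above when the predicate is false there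
lemma filter_pyRange_trim_bot (p : Int → Bool) (a a' b : Int) (h : a ≤ a')
    (hfalse : ∀ j, a ≤ j → j < a' → p j = false) :
    (PySem.List.pyRange a b).filter p = (PySem.List.pyRange a' b).filter p := by
  by_cases hb : a' ≤ b
  · rw [PySem.List.pyRange_one_append a a' b h hb, List.filter_append]
    have : (PySem.List.pyRange a a').filter p = [] := by
      apply List.filter_eq_nil_iff.mpr
      intro j hj
      have := PySem.List.mem_pyRange_one.mp hj
      simp [hfalse j this.1 this.2]
    simp [this]
  · rw [PySem.List.pyRange_one_eq_nil (by omega : b ≤ a')]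
    apply List.filter_eq_nil_iff.mpr
    intro j hj
    have := PySem.List.mem_pyRange_one.mp hj
    simp [hfalse j this.1 (by omega)]

lemma filter_pyRange_trim_top (p : Int → Bool) (a b b' : Int) (h : b' ≤ b)
    (hfalse : ∀ j, b' ≤ j → j < b → p j = false) :
    (PySem.List.pyRange a b).filter p = (PySem.List.pyRange a b').filter p := by
  by_cases ha : a ≤ b'
  · rw [PySem.List.pyRange_one_append a b' b ha h, List.filter_append]
    have : (PySem.List.pyRange b' b).filter p = [] := by
      apply List.filter_eq_nil_iff.mpr
      intro j hj
      have := PySem.List.mem_pyRange_one.mp hj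
      simp [hfalse j this.1 this.2]
    simp [this]
  · rw [PySem.List.pyRange_one_eq_nil (by omega : b' ≤ a)]
    apply List.filter_eq_nil_iff.mpr
    intro j hj
    have := PySem.List.mem_pyRange_one.mp hj
    simp [hfalse j (by omega) this.2]

-- per-start window equality between A's range filter and B's ends filter
lemma window_eq (num_tokens max_span_width : Int) (isstartingtoken : List Int)
    (i : Int) (hi0 : 0 ≤ i) :
    (PySem.List.pyRange i (i + max_span_width)).filter (pvCondA num_tokens isstartingtoken)
      = ((PySem.List.pyRange 0 num_tokens).filter (pvBdry num_tokens isstartingtoken)).filter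
          (fun j => decide (i ≤ j) && decide (j < i + max_span_width)) := by
  rw [List.filter_filter]
  rw [filter_pyRange_trim_top (pvCondA num_tokens isstartingtoken) i (i + max_span_width)
        (min num_tokens (i + max_span_width)) (by omega) ?_]
  · rw [filter_pyRange_trim_bot _ 0 i num_tokens hi0 ?_]
    · rw [filter_pyRange_trim_top _ i num_tokens (min num_tokens (i + max_span_width)) (by omega) ?_]
      · apply List.filter_congr
        intro j hj
        have hmem := PySem.List.mem_pyRange_one.mp hj
        have h1 : ¬ num_tokens ≤ j := by omega
        have h2 : i ≤ j := hmem.1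
        have h3 : j < i + max_span_width := by omega
        simp [pvCondA, h1, h2, h3]
      · intro j hj1 hj2
        have : ¬ (j < i + max_span_width) := by omega
        simp [this]
    · intro j hj1 hj2
      have : ¬ (i ≤ j) := by omega
      simp [this]
  · intro j hj1 hj2
    have : num_tokens ≤ j := by omega
    simp [pvCondA, this]

-- ===== VERDICT (by name: the statement is the Claim_ definition above) =====
theorem enumerate_candidate_spans_spec : Claim_equal_enumerate_candidate_spans := by
  intro num_tokens max_span_width isstartingtoken _ _
  unfold Spec_enumerate_candidate_spans enumerate_candidate_spans enumerate_candidate_spans_alt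
  show _ = pvAltJoin max_span_width
    ((PySem.List.pyRange 0 num_tokens).filter
      (fun i => PySem.List.pyGetD isstartingtoken i 0 != 0))
    ((PySem.List.pyRange 0 num_tokens).filter
      (fun j => j == num_tokens - 1 || PySem.List.pyGetD isstartingtoken (j + 1) 0 == 1))
  rw [outerA_eq num_tokens max_span_width isstartingtoken (PySem.List.pyRange 0 num_tokens)
        PySem.Set.empty (PySem.List.nodup_pyRange_one 0 num_tokens)
        (by intro p hp; cases hp)]
  have hnil : (PySem.Set.empty : List (Int × Int)) = [] := rfl
  rw [hnil, List.nil_append]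
  rw [flatMap_congr_mem _
        (fun i => if (PySem.List.pyGetD isstartingtoken i 0 != 0) then
          ((PySem.List.pyRange i (i + max_span_width)).filter
            (pvCondA num_tokens isstartingtoken)).map (fun j => (i, j)) else [])
        _ (by intro i _; by_cases h : PySem.List.pyGetD isstartingtoken i 0 == 0 <;>
              simp [h, bne] )]
  rw [flatMap_if_filter]
  have hR : (PySem.List.pyRange 0 num_tokens).Pairwise (· ≤ ·) :=
    (PySem.List.pairwise_lt_pyRange_one 0 num_tokens).imp (fun h => le_of_lt h)
  rw [pvAltJoin_eq max_span_width _ _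
        (List.Pairwise.sublist List.filter_sublist hR)
        (List.Pairwise.sublist List.filter_sublist hR)]
  apply flatMap_congr_mem
  intro i hi
  have hi0 : 0 ≤ i :=
    (PySem.List.mem_pyRange_one.mp (List.mem_of_mem_filter hi)).1
  have hbd : (fun j => j == num_tokens - 1 ||
      PySem.List.pyGetD isstartingtoken (j + 1) 0 == 1)
      = pvBdry num_tokens isstartingtoken := rfl
  rw [hbd, window_eq num_tokens max_span_width isstartingtoken i hi0]
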